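-- pv_equiv track=rewrite | github.com/Aniell4/Discord-Badge-Scraper-Finder | main.py | check_flags
-- ===== SOURCE A (Python) =====
-- def check_flags(flag_int):
-- 	################
-- 	flag_dict = {
-- 		'Discord_Employee': 1,
-- 		'Partnered_Server_Owner': 2,
-- 		'HypeSquad_Events': 4,
-- 		'Bug_Hunter_Level_1': 8,
-- 		#'House_Bravery': 64,
-- 		#'House_Brilliance': 128,
-- 		#'House_Balance': 256,
-- 		'Early_Supporter': 512,
-- 		'Team_Pseudo_user': 1024,
-- 		'Bug_Hunter_Level_2': 16384,
-- 		'Verified_Bot': 65536,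
-- 		'Early_Verified_Bot_Developer': 131072,
-- 		'Discord_Certified_moderator': 262144,
-- 		'BOT_HTTP_INTERACIONS': 524288,
-- 	}
-- 	################
--
-- 	flags = []
-- 	for flag_key in flag_dict.keys():
-- 		if ((flag_int & flag_dict[flag_key]) == flag_dict[flag_key]):
-- 			flags.append(flag_key)
--
-- 	return flags
-- ===== SOURCE B (Python) =====
-- def check_flags(flag_int):
-- 	names = {
-- 		1: 'Discord_Employee',
-- 		2: 'Partnered_Server_Owner',
-- 		4: 'HypeSquad_Events',
-- 		8: 'Bug_Hunter_Level_1',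
-- 		512: 'Early_Supporter',
-- 		1024: 'Team_Pseudo_user',
-- 		16384: 'Bug_Hunter_Level_2',
-- 		65536: 'Verified_Bot',
-- 		131072: 'Early_Verified_Bot_Developer',
-- 		262144: 'Discord_Certified_moderator',
-- 		524288: 'BOT_HTTP_INTERACIONS',
-- 	}
-- 	m = flag_int & sum(names)
-- 	flags = []
-- 	while m:
-- 		b = m & -m
-- 		flags.append(names[b])
-- 		m -= b
-- 	return flags
-- ===== Notes on version B (the rewrite author's own statement) =====
-- stated objective: alternative
-- what changed: B inverts the dict into a value->name mapping, masks flag_int to the known bits once, and then extracts the lowest set bit (m & -m) in a while loop, looking each bit value up in the reverse dict, instead of A's scan over all dict keys with a mask-and-compare test per key; it iterates only over the bits actually set.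
import Mathlib
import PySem

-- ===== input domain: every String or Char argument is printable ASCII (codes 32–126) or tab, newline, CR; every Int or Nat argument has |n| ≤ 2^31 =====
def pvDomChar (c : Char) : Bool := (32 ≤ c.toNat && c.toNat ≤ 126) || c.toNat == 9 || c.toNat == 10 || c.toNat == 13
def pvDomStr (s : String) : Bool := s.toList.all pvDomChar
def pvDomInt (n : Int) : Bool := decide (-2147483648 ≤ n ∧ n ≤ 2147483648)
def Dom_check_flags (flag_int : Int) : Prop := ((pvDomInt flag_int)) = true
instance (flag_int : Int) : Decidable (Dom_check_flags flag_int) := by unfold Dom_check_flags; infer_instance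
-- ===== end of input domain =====

-- B inverts the dict (value -> name), masks flag_int to the known bits and then extracts the
-- lowest set bit (m & -m) one at a time, looking each bit value up, instead of A's scan over
-- all dict keys with a mask-and-compare test per key; same output list in the same order.

-- ===== PORT A =====
def check_flags (flag_int : Int) : List String :=
  let flag_dict : PySem.Dict String Int := PySem.Dict.mk [
    ("Discord_Employee", 1),
    ("Partnered_Server_Owner", 2),
    ("HypeSquad_Events", 4),
    ("Bug_Hunter_Level_1", 8),
    ("Early_Supporter", 512),
    ("Team_Pseudo_user", 1024),
    ("Bug_Hunter_Level_2", 16384),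
    ("Verified_Bot", 65536),
    ("Early_Verified_Bot_Developer", 131072),
    ("Discord_Certified_moderator", 262144),
    ("BOT_HTTP_INTERACIONS", 524288)]
  -- flag_dict[flag_key]: the key is drawn from flag_dict.keys(), so the lookup cannot
  -- raise KeyError; ported as getD with an unreachable default.
  flag_dict.keys.foldl (fun flags flag_key =>
    if PySem.Int.band flag_int (flag_dict.getD flag_key 0) = flag_dict.getD flag_key 0
    then flags ++ [flag_key] else flags) []

-- ===== PORT B =====
-- the reverse dict 'names' of Source B: bit value -> flag name
def pvNames : PySem.Dict Int String := PySem.Dict.mk [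
  (1, "Discord_Employee"),
  (2, "Partnered_Server_Owner"),
  (4, "HypeSquad_Events"),
  (8, "Bug_Hunter_Level_1"),
  (512, "Early_Supporter"),
  (1024, "Team_Pseudo_user"),
  (16384, "Bug_Hunter_Level_2"),
  (65536, "Verified_Bot"),
  (131072, "Early_Verified_Bot_Developer"),
  (262144, "Discord_Certified_moderator"),
  (524288, "BOT_HTTP_INTERACIONS")]

-- termination fact for the while loop: for m > 0, b = m & -m satisfies 0 < b ≤ m
theorem pv_band_neg_self (mN : Nat) (h : 0 < mN) :
    PySem.Int.band (↑mN) (-↑mN) = ↑(mN - (mN &&& (mN - 1))) := by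
  simp only [PySem.Int.band]
  rw [if_pos (by positivity), if_neg (by omega)]
  have h3 : (-(-(mN:Int)) - 1).toNat = mN - 1 := by omega
  rw [h3, Int.toNat_natCast]

-- the 'while m:' loop of Source B.  Its loop variable is flag_int & mask, hence nonnegative at
-- every iteration, so the stopping test 'm ≤ 0' coincides with Python's 'while m'; '≤' (rather
-- than '=') only makes the recursion well-founded.  names[b] cannot miss (b is a set bit of the
-- mask), so the lookup is ported as getD with an unreachable default.
def pvLoop (m : Int) : List String :=
  if m ≤ 0 then []
  else
    let b := PySem.Int.band m (-m)
    pvNames.getD b "" :: pvLoop (m - b)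
termination_by m.toNat
decreasing_by
  have h0 : 0 < m.toNat := by omega
  have hb : PySem.Int.band m (-m) = ↑(m.toNat - (m.toNat &&& (m.toNat - 1))) := by
    have := pv_band_neg_self m.toNat h0
    rwa [Int.toNat_of_nonneg (by omega)] at this
  have hle : m.toNat &&& (m.toNat - 1) ≤ m.toNat - 1 := Nat.and_le_right
  simp only [hb]
  omega

def check_flags_alt (flag_int : Int) : List String :=
  pvLoop (PySem.Int.band flag_int (pvNames.keys.sum))

-- ===== PRECONDITION & SPEC =====
def Spec_check_flags (flag_int : Int) (out : List String) : Prop := out = check_flags_alt flag_int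
instance (flag_int : Int) (out : List String) : Decidable (Spec_check_flags flag_int out) := by unfold Spec_check_flags; infer_instance

-- ===== CLAIM (what is proved, stated in full; the proofs are below) =====
def Claim_equal_check_flags : Prop := ∀ (flag_int : Int), Dom_check_flags flag_int → Spec_check_flags flag_int (check_flags flag_int)

-- ===== LEMMAS AND PROOFS =====

-- the common bit table: (bit position, flag name), ascending
def pvLB : List (Nat × String) := [
  (0, "Discord_Employee"),
  (1, "Partnered_Server_Owner"),
  (2, "HypeSquad_Events"),
  (3, "Bug_Hunter_Level_1"),
  (9, "Early_Supporter"),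
  (10, "Team_Pseudo_user"),
  (14, "Bug_Hunter_Level_2"),
  (16, "Verified_Bot"),
  (17, "Early_Verified_Bot_Developer"),
  (18, "Discord_Certified_moderator"),
  (19, "BOT_HTTP_INTERACIONS")]

-- x - (x & a) clears of x exactly the bits that are also in a  (Python's x & ~a on naturals)
theorem pv_sub_and_testBit : ∀ (x : Nat), ∀ (a j : Nat),
    (x - (x &&& a)).testBit j = (x.testBit j && !a.testBit j) := by
  intro x
  induction x using Nat.strong_induction_on with
  | _ x ih =>
    intro a j
    rcases Nat.eq_zero_or_pos x with hx | hx
    · subst hx; simp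
    · have hb := Nat.testBit_and x a 0
      simp only [Nat.testBit_zero] at hb
      have hb0 : ((x &&& a) % 2 = 1) ↔ (x % 2 = 1 ∧ a % 2 = 1) := by
        rcases Nat.mod_two_eq_zero_or_one x with h1 | h1 <;>
          rcases Nat.mod_two_eq_zero_or_one a with h2 | h2 <;>
            simp [h1, h2] at hb ⊢ <;> try omega
      have hdiv : (x &&& a) / 2 = (x / 2) &&& (a / 2) := by
        apply Nat.eq_of_testBit_eq
        intro i
        rw [Nat.testBit_div_two, Nat.testBit_and, Nat.testBit_and,
          Nat.testBit_div_two, Nat.testBit_div_two]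
      have hy2 : (x &&& a) % 2 ≤ x % 2 := by
        rcases Nat.mod_two_eq_zero_or_one (x &&& a) with h | h
        · omega
        · have := hb0.mp h; omega
      have hyd : (x / 2) &&& (a / 2) ≤ x / 2 := Nat.and_le_left
      have e2 : 2 * ((x / 2) &&& (a / 2)) + (x &&& a) % 2 = x &&& a := by
        rw [← hdiv]; omega
      have hdecomp : x - (x &&& a) = 2 * (x / 2 - ((x / 2) &&& (a / 2))) + (x % 2 - (x &&& a) % 2) := by
        omega
      cases j with
      | zero =>
        rw [Nat.testBit_zero, Nat.testBit_zero, Nat.testBit_zero]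
        have hm : (x - (x &&& a)) % 2 = x % 2 - (x &&& a) % 2 := by omega
        rw [hm]
        rcases Nat.mod_two_eq_zero_or_one x with h1 | h1 <;>
          rcases Nat.mod_two_eq_zero_or_one a with h2 | h2 <;>
            simp [h1, h2] <;> omega
      | succ j =>
        rw [Nat.testBit_succ, Nat.testBit_succ, Nat.testBit_succ]
        have hq : (x - (x &&& a)) / 2 = x / 2 - ((x / 2) &&& (a / 2)) := by omega
        rw [hq]
        exact ih (x / 2) (Nat.div_lt_self hx (by omega)) (a / 2) j

-- bit k set, lower bits clear  ⇒  m % 2^(k+1) = 2^k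
theorem pv_mod_eq (m k : Nat) (hk : m.testBit k = true)
    (hlow : ∀ j, j < k → m.testBit j = false) : m % 2 ^ (k + 1) = 2 ^ k := by
  apply Nat.eq_of_testBit_eq
  intro j
  rw [Nat.testBit_mod_two_pow, Nat.testBit_two_pow]
  rcases lt_trichotomy j k with h | h | h
  · rw [hlow j h]
    simp [(show ¬ k = j by omega)]
  · subst h
    simp [hk]
  · simp [(show ¬ j < k + 1 by omega), (show ¬ k = j by omega)]

-- m % 2^(k+1) = 2^k  ⇒  m & (m-1) clears the lowest set bit 2^k
theorem pv_and_pred (m k : Nat) (hmod : m % 2 ^ (k + 1) = 2 ^ k) :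
    m &&& (m - 1) = m - 2 ^ k := by
  have hk1 : (2:Nat) ^ k < 2 ^ (k + 1) := by
    have : (2:Nat) ^ k > 0 := Nat.two_pow_pos k
    calc (2:Nat) ^ k < 2 ^ k + 2 ^ k := by omega
      _ = 2 ^ (k + 1) := by ring
  have hm : 2 ^ (k + 1) * (m / 2 ^ (k + 1)) + 2 ^ k = m := by
    have := Nat.div_add_mod m (2 ^ (k + 1)); omega
  set q := m / 2 ^ (k + 1) with hq
  have hpos : (0:Nat) < 2 ^ k := Nat.two_pow_pos k
  have hm1 : m - 1 = 2 ^ (k + 1) * q + (2 ^ k - 1) := by omega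
  have hms : m - 2 ^ k = 2 ^ (k + 1) * q + 0 := by omega
  apply Nat.eq_of_testBit_eq
  intro j
  rw [Nat.testBit_and, hm1, hms, ← hm,
    Nat.testBit_two_pow_mul_add _ hk1, Nat.testBit_two_pow_mul_add _ (by omega),
    Nat.testBit_two_pow_mul_add _ (by omega)]
  by_cases hj : j < k + 1
  · simp [hj, Nat.testBit_two_pow, Nat.testBit_two_pow_sub_one, Nat.zero_testBit]
    omega
  · simp [hj]

-- m % 2^(k+1) = 2^k  ⇒  bits of m - 2^k are the bits of m above k
theorem pv_sub_pow_testBit (m k : Nat) (hmod : m % 2 ^ (k + 1) = 2 ^ k) (j : Nat) :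
    (m - 2 ^ k).testBit j = (decide (k < j) && m.testBit j) := by
  have hk1 : (2:Nat) ^ k < 2 ^ (k + 1) := by
    have : (2:Nat) ^ k > 0 := Nat.two_pow_pos k
    calc (2:Nat) ^ k < 2 ^ k + 2 ^ k := by omega
      _ = 2 ^ (k + 1) := by ring
  have hm : 2 ^ (k + 1) * (m / 2 ^ (k + 1)) + 2 ^ k = m := by
    have := Nat.div_add_mod m (2 ^ (k + 1)); omega
  set q := m / 2 ^ (k + 1) with hq
  have hms : m - 2 ^ k = 2 ^ (k + 1) * q + 0 := by omega
  rw [hms, ← hm, Nat.testBit_two_pow_mul_add _ (by omega),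
    Nat.testBit_two_pow_mul_add _ hk1]
  by_cases hj : j < k + 1
  · simp [hj, Nat.zero_testBit, Nat.testBit_two_pow]
    omega
  · simp [hj, (show k < j by omega)]

-- PySem.Int.band of a negative int with a natural
theorem pv_band_negSucc (a v : Nat) :
    PySem.Int.band (Int.negSucc a) (↑v) = ↑(v - (v &&& a)) := by
  have h4 : Int.negSucc a = -((a : Int) + 1) := Int.negSucc_eq a
  simp only [PySem.Int.band]
  rw [if_neg (by rw [h4]; omega), if_pos (by omega)]
  have h3 : (-Int.negSucc a - 1).toNat = a := by rw [h4]; omega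
  rw [h3, Int.toNat_natCast]

-- A's loop over the dict keys, as a filterMap over the bit table
theorem pv_fold_eq (n : Int) (d : PySem.Dict String Int) (L : List (Nat × String))
    (ks : List String) (acc : List String) (hks : ks = L.map (·.2))
    (h : ∀ p ∈ L, d.getD p.2 0 = (2:Int) ^ p.1) :
    ks.foldl (fun flags k =>
        if PySem.Int.band n (d.getD k 0) = d.getD k 0 then flags ++ [k] else flags) acc
      = acc ++ L.filterMap (fun p =>
          if PySem.Int.band n ((2:Int) ^ p.1) = (2:Int) ^ p.1 then some p.2 else none) := by
  subst hks
  induction L generalizing acc with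
  | nil => simp
  | cons p t ih =>
    have hp := h p (List.mem_cons_self)
    simp only [List.map_cons, List.foldl_cons, List.filterMap_cons, hp]
    by_cases hc : PySem.Int.band n ((2:Int) ^ p.1) = (2:Int) ^ p.1
    · rw [if_pos hc, if_pos hc, ih _ (fun q hq => h q (List.mem_cons_of_mem _ hq))]
      simp
    · rw [if_neg hc, if_neg hc, ih _ (fun q hq => h q (List.mem_cons_of_mem _ hq))]

-- A's test 'flag & 2^k == 2^k' is bit k of the masked value, for any k set in the mask
theorem pv_test_iff (flag : Int) (k FM : Nat) (hFM : FM.testBit k = true) :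
    (PySem.Int.band flag ((2:Int) ^ k) = (2:Int) ^ k)
      ↔ (PySem.Int.band flag ↑FM).toNat.testBit k = true := by
  have h2 : ((2:Int) ^ k) = ((2 ^ k : Nat) : Int) := by push_cast; ring
  have hpos : (0:Nat) < 2 ^ k := Nat.two_pow_pos k
  rcases flag with n | a
  · have hc : (Int.ofNat n) = ((n : Nat) : Int) := rfl
    rw [hc, h2, PySem.Int.band_natCast, PySem.Int.band_natCast,
      Int.toNat_natCast, Nat.testBit_and, hFM, Bool.and_true]
    constructor
    · intro h
      have h' : n &&& 2 ^ k = 2 ^ k := by exact_mod_cast h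
      rw [Nat.and_two_pow] at h'
      rcases Bool.eq_false_or_eq_true (n.testBit k) with hb | hb
      · exact hb
      · rw [hb] at h'; simp at h'; omega
    · intro h
      have h' : n &&& 2 ^ k = 2 ^ k := by rw [Nat.and_two_pow, h]; simp
      exact_mod_cast congrArg (fun z : Nat => (z : Int)) h'
  · rw [h2, pv_band_negSucc, pv_band_negSucc, Int.toNat_natCast,
      pv_sub_and_testBit, hFM, Bool.true_and]
    have hand : 2 ^ k &&& a = 2 ^ k * (a.testBit k).toNat := Nat.two_pow_and a k
    constructor
    · intro h
      have h' : 2 ^ k - (2 ^ k &&& a) = 2 ^ k := by exact_mod_cast h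
      rw [hand] at h'
      rcases Bool.eq_false_or_eq_true (a.testBit k) with hb | hb
      · rw [hb] at h'; simp at h'; omega
      · simp [hb]
    · intro h
      simp only [Bool.not_eq_true'] at h
      rw [hand, h]
      norm_num

-- bits of the masked value lie in the mask
theorem pv_sub_mask (flag : Int) (FM : Nat) (j : Nat)
    (h : (PySem.Int.band flag ↑FM).toNat.testBit j = true) : FM.testBit j = true := by
  rcases flag with n | a
  · have hc : (Int.ofNat n) = ((n : Nat) : Int) := rfl
    rw [hc, PySem.Int.band_natCast, Int.toNat_natCast, Nat.testBit_and] at h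
    simp only [Bool.and_eq_true] at h
    exact h.2
  · rw [pv_band_negSucc, Int.toNat_natCast, pv_sub_and_testBit] at h
    simp only [Bool.and_eq_true] at h
    exact h.1

-- the masked value is nonnegative
theorem pv_band_nat (flag : Int) (FM : Nat) :
    PySem.Int.band flag ↑FM = ↑((PySem.Int.band flag ↑FM).toNat) := by
  rw [PySem.Int.band_comm]
  exact (Int.toNat_of_nonneg (PySem.Int.band_nonneg_of_nonneg_left _ (by omega))).symm

-- MAIN B LEMMA: the lowest-set-bit extraction loop equals the filterMap over an ascending
-- bit table covering all bits of m
theorem pv_loop_eq (LB : List (Nat × String)) (hsort : LB.Pairwise (fun p q => p.1 < q.1))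
    (hname : ∀ p ∈ LB, pvNames.getD ((2:Int) ^ p.1) "" = p.2) :
    ∀ (m : Nat), (∀ j, m.testBit j = true → ∃ p ∈ LB, p.1 = j) →
    pvLoop ↑m = LB.filterMap (fun p => if m.testBit p.1 then some p.2 else none) := by
  induction LB with
  | nil =>
    intro m hsub
    have hm : m = 0 := by
      apply Nat.eq_of_testBit_eq
      intro i
      rw [Nat.zero_testBit]
      rcases Bool.eq_false_or_eq_true (m.testBit i) with hb | hb
      · rcases hsub i hb with ⟨p, hp, _⟩
        simp at hp
      · exact hb
    subst hm
    rw [pvLoop]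
    simp
  | cons p t ih =>
    intro m hsub
    rcases p with ⟨k, s⟩
    have hsort' : t.Pairwise (fun p q => p.1 < q.1) := hsort.of_cons
    have hlt : ∀ q ∈ t, k < q.1 := fun q hq => (List.pairwise_cons.mp hsort).1 q hq
    have hname' : ∀ p ∈ t, pvNames.getD ((2:Int) ^ p.1) "" = p.2 :=
      fun q hq => hname q (List.mem_cons_of_mem _ hq)
    by_cases hk : m.testBit k = true
    · -- bit k is set; it is the lowest set bit of m
      have hlow : ∀ j, j < k → m.testBit j = false := by
        intro j hj
        rcases Bool.eq_false_or_eq_true (m.testBit j) with hb | hb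
        · rcases hsub j hb with ⟨q, hq, hq1⟩
          rcases List.mem_cons.mp hq with hq | hq
          · rw [hq] at hq1; omega
          · have := hlt q hq; omega
        · exact hb
      have hmod : m % 2 ^ (k + 1) = 2 ^ k := pv_mod_eq m k hk hlow
      have hple : (2:Nat) ^ k ≤ m := by
        have := Nat.mod_le m (2 ^ (k + 1)); omega
      have hpos : (0:Nat) < 2 ^ k := Nat.two_pow_pos k
      have hmpos : 0 < m := by omega
      rw [pvLoop]
      rw [if_neg (by omega : ¬ (↑m : Int) ≤ 0)]
      have hb : PySem.Int.band (↑m) (-↑m) = ((2 ^ k : Nat) : Int) := by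
        rw [pv_band_neg_self m hmpos, pv_and_pred m k hmod]
        congr 1
        omega
      simp only [hb]
      have hcast : ((2 ^ k : Nat) : Int) = (2:Int) ^ k := by push_cast; ring
      have hmsub : (↑m : Int) - ((2 ^ k : Nat) : Int) = ↑(m - 2 ^ k) := by
        push_cast [Nat.cast_sub hple]; ring
      rw [hmsub, hcast, hname ⟨k, s⟩ (List.mem_cons_self)]
      have hsub' : ∀ j, (m - 2 ^ k).testBit j = true → ∃ q ∈ t, q.1 = j := by
        intro j hj
        rw [pv_sub_pow_testBit m k hmod] at hj
        simp only [Bool.and_eq_true, decide_eq_true_eq] at hj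
        obtain ⟨hj1, hj2⟩ := hj
        rcases hsub j hj2 with ⟨q, hq, hq1⟩
        rcases List.mem_cons.mp hq with hq | hq
        · rw [hq] at hq1; omega
        · exact ⟨q, hq, hq1⟩
      rw [ih hsort' hname' (m - 2 ^ k) hsub']
      rw [List.filterMap_cons]
      simp only [hk, if_pos]
      congr 1
      apply List.filterMap_congr
      intro q hq
      have hkq : k < q.1 := hlt q hq
      rw [pv_sub_pow_testBit m k hmod, decide_eq_true hkq, Bool.true_and]
    · -- bit k clear: the head is skipped and the loop is untouched
      have hsub' : ∀ j, m.testBit j = true → ∃ q ∈ t, q.1 = j := by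
        intro j hj
        rcases hsub j hj with ⟨q, hq, hq1⟩
        rcases List.mem_cons.mp hq with hq | hq
        · rw [hq] at hq1; subst hq1; exact absurd hj hk
        · exact ⟨q, hq, hq1⟩
      rw [ih hsort' hname' m hsub', List.filterMap_cons]
      simp only [hk]
      simp

-- ===== VERDICT (by name: the statement is the Claim_ definition above) =====
theorem check_flags_spec : Claim_equal_check_flags := by
  intro flag _
  unfold Spec_check_flags check_flags check_flags_alt
  rw [pv_fold_eq flag _ pvLB _ [] (by decide) (by decide)]
  have hsum : (pvNames.keys.sum : Int) = ((1000975 : Nat) : Int) := by decide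
  rw [hsum, pv_band_nat flag 1000975]
  set mN := (PySem.Int.band flag ((1000975 : Nat) : Int)).toNat with hmN
  have hsub : ∀ j, mN.testBit j = true → ∃ p ∈ pvLB, p.1 = j := by
    intro j hj
    have hFM := pv_sub_mask flag 1000975 j hj
    by_cases h20 : j < 20
    · revert hFM
      interval_cases j <;> decide
    · have : (1000975 : Nat) < 2 ^ j := by
        calc (1000975 : Nat) < 2 ^ 20 := by norm_num
          _ ≤ 2 ^ j := Nat.pow_le_pow_right (by omega) (by omega)
      rw [Nat.testBit_lt_two_pow this] at hFM
      exact absurd hFM (by simp)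
  rw [pv_loop_eq pvLB (by decide) (by decide) mN hsub]
  apply List.filterMap_congr
  intro p hp
  have hFM : (1000975 : Nat).testBit p.1 = true := by
    fin_cases hp <;> decide
  have hiff := pv_test_iff flag p.1 1000975 hFM
  rw [← hmN] at hiff
  by_cases hc : PySem.Int.band flag ((2:Int) ^ p.1) = (2:Int) ^ p.1
  · rw [if_pos hc, hiff.mp hc, if_pos rfl]
  · rw [if_neg hc]
    have : mN.testBit p.1 = false := by
      rcases Bool.eq_false_or_eq_true (mN.testBit p.1) with hb | hb
      · exact absurd (hiff.mpr hb) hc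
      · exact hb
    simp [this]
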